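-- pv_equiv track=rewrite | github.com/rec3141/danaSeq | nanopore_mag/nextflow/bin/islandpath_dimob.py | count_dimers_nonoverlap
-- ===== SOURCE A (Python) =====
-- from collections import defaultdict
--
-- VALID_BASES = set('ACGT')
--
-- def count_dimers_nonoverlap(seq):
--     """Count non-overlapping dimers in seq (step=2).
--
--     Returns (mono_counts, di_counts) as dicts.
--     Matches original Perl SeqWords2: step-2 counting, NOT overlapping.
--     """
--     mono = defaultdict(int)
--     di = defaultdict(int)
--     # Ensure even length (truncate last base if odd)
--     end = len(seq) if len(seq) % 2 == 0 else len(seq) - 1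
--     for i in range(0, end, 2):
--         b1 = seq[i]
--         b2 = seq[i + 1] if i + 1 < len(seq) else None
--         if b1 in VALID_BASES:
--             mono[b1] += 1
--         if b2 is not None and b2 in VALID_BASES:
--             mono[b2] += 1
--         if b2 is not None and b1 in VALID_BASES and b2 in VALID_BASES:
--             di[b1 + b2] += 1
--     return mono, di
-- ===== SOURCE B (Python) =====
-- from collections import defaultdict
--
-- VALID_BASES = set('ACGT')
--
-- def count_dimers_nonoverlap(seq):
--     """Two-pass variant: per-base monomer pass over the even prefix,
--     then a step-2 pair pass for dimers."""
--     mono = defaultdict(int)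
--     di = defaultdict(int)
--     end = len(seq) - len(seq) % 2
--     for b in seq[:end]:
--         if b in VALID_BASES:
--             mono[b] += 1
--     for i in range(0, end, 2):
--         b1 = seq[i]
--         b2 = seq[i + 1]
--         if b1 in VALID_BASES and b2 in VALID_BASES:
--             di[b1 + b2] += 1
--     return mono, di
-- ===== Notes on version B (the rewrite author's own statement) =====
-- stated objective: alternative
-- what changed: A's single fused step-2 loop carrying both counters and an optional second base is split into two independent passes of different shape: a per-character monomer pass over the even-length prefix and a step-2 pair pass for dimers.
import Mathlib
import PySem

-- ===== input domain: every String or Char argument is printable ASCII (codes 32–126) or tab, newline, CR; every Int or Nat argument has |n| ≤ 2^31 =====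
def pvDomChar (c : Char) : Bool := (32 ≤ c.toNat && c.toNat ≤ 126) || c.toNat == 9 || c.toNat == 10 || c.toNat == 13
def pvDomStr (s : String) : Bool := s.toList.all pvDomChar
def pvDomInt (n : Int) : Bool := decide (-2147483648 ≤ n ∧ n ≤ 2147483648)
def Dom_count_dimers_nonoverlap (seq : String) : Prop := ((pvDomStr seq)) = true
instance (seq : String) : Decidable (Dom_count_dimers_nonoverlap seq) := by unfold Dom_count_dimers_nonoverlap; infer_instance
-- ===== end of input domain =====

-- B splits A's single fused step-2 loop into a per-character monomer pass and a
-- separate step-2 dimer pass (objective: alternative decomposition, same cost).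

-- ===== PORT A =====
-- VALID_BASES = set('ACGT')
def pvVALID_BASES : List Char := ['A', 'C', 'G', 'T']

-- loop body of A: handles b1, optional b2, and the dimer in one step
def pvStepA (cs : List Char) (st : PySem.Dict String Int × PySem.Dict String Int) (i : Int) :
    PySem.Dict String Int × PySem.Dict String Int :=
  let b1 := PySem.List.pyGetD cs i ' '
  let b2 : Option Char := if i + 1 < (cs.length : Int) then some (PySem.List.pyGetD cs (i + 1) ' ') else none
  let mono := if pvVALID_BASES.contains b1 then st.1.modify (String.mk [b1]) 0 (· + 1) else st.1
  let mono := match b2 with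
    | some c => if pvVALID_BASES.contains c then mono.modify (String.mk [c]) 0 (· + 1) else mono
    | none => mono
  let di := match b2 with
    | some c => if pvVALID_BASES.contains b1 && pvVALID_BASES.contains c then
                  st.2.modify (String.mk [b1, c]) 0 (· + 1) else st.2
    | none => st.2
  (mono, di)

def count_dimers_nonoverlap (seq : String) : (List (String × Int)) × (List (String × Int)) :=
  let cs := seq.toList
  let endN : Nat := if cs.length % 2 = 0 then cs.length else cs.length - 1
  let st := (PySem.List.pyRange 0 (endN : Int) 2).foldl (pvStepA cs)
      (({ items := [] } : PySem.Dict String Int), ({ items := [] } : PySem.Dict String Int))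
  (st.1.items, st.2.items)

-- ===== PORT B =====
-- monomer pass body: one character at a time
def pvStepMono (d : PySem.Dict String Int) (b : Char) : PySem.Dict String Int :=
  if pvVALID_BASES.contains b then d.modify (String.mk [b]) 0 (· + 1) else d

-- dimer pass body: one index pair at a time
def pvStepDi (cs : List Char) (d : PySem.Dict String Int) (i : Int) : PySem.Dict String Int :=
  let b1 := PySem.List.pyGetD cs i ' '
  let b2 := PySem.List.pyGetD cs (i + 1) ' '
  if pvVALID_BASES.contains b1 && pvVALID_BASES.contains b2 then
    d.modify (String.mk [b1, b2]) 0 (· + 1) else d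

def count_dimers_nonoverlap_alt (seq : String) : (List (String × Int)) × (List (String × Int)) :=
  let cs := seq.toList
  let endN : Nat := cs.length - cs.length % 2
  let mono := (cs.take endN).foldl pvStepMono ({ items := [] } : PySem.Dict String Int)
  let di := (PySem.List.pyRange 0 (endN : Int) 2).foldl (pvStepDi cs) ({ items := [] } : PySem.Dict String Int)
  (mono.items, di.items)

-- ===== PRECONDITION & SPEC =====
def Spec_count_dimers_nonoverlap (seq : String) (out : (List (String × Int)) × (List (String × Int))) : Prop := out = count_dimers_nonoverlap_alt seq
instance (seq : String) (out : (List (String × Int)) × (List (String × Int))) : Decidable (Spec_count_dimers_nonoverlap seq out) := by unfold Spec_count_dimers_nonoverlap; infer_instance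

-- ===== CLAIM (what is proved, stated in full; the proofs are below) =====
def Claim_equal_count_dimers_nonoverlap : Prop := ∀ (seq : String), Dom_count_dimers_nonoverlap seq → Spec_count_dimers_nonoverlap seq (count_dimers_nonoverlap seq)

-- ===== LEMMAS AND PROOFS =====

-- the even indices 0, 2, …, 2k-2 as integers
def pvEvens (k : Nat) : List Int := (List.range k).map (fun j => ((2 * j : Nat) : Int))

theorem pvEvens_succ (k : Nat) : pvEvens (k + 1) = pvEvens k ++ [((2 * k : Nat) : Int)] := by
  simp [pvEvens, List.range_succ]

-- range(0, 2k, 2) is the evens 0, 2, …, 2k-2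
theorem pvRangeEven (k : Nat) :
    PySem.List.pyRange 0 ((2 * k : Nat) : Int) 2 = pvEvens k := by
  rw [PySem.List.pyRange_of_pos 0 ((2 * k : Nat) : Int) (by norm_num)]
  rcases Nat.eq_zero_or_pos k with hk | hk
  · subst hk; simp [pvEvens]
  · have hlt : (0 : Int) < ((2 * k : Nat) : Int) := by positivity
    rw [if_pos hlt]
    have hc : ((((2 * k : Nat) : Int) - 0 + 2 - 1) / 2).toNat = k := by
      push_cast; omega
    rw [hc]
    apply List.map_congr_left
    intro a _
    push_cast; ring

-- one fused A-step at index 2k equals two monomer steps plus one dimer step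
theorem pvStepA_split (cs : List Char) (k : Nat) (h : 2 * k + 1 < cs.length)
    (m d : PySem.Dict String Int) :
    pvStepA cs (m, d) ((2 * k : Nat) : Int) =
      (pvStepMono (pvStepMono m cs[2 * k]) cs[2 * k + 1], pvStepDi cs d ((2 * k : Nat) : Int)) := by
  have h2k : 2 * k < cs.length := by omega
  have h2 : ((2 * k : Nat) : Int) + 1 = ((2 * k + 1 : Nat) : Int) := by push_cast; ring
  have hb1 : PySem.List.pyGetD cs ((2 * k : Nat) : Int) ' ' = cs[2 * k] := by
    rw [PySem.List.pyGetD_natCast]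
    exact List.getD_eq_getElem cs ' ' h2k
  have hb2 : PySem.List.pyGetD cs (((2 * k : Nat) : Int) + 1) ' ' = cs[2 * k + 1] := by
    rw [h2, PySem.List.pyGetD_natCast]
    exact List.getD_eq_getElem cs ' ' h
  have hlt : ((2 * k : Nat) : Int) + 1 < (cs.length : Int) := by
    rw [h2]; exact_mod_cast h
  simp only [pvStepA, pvStepMono, pvStepDi, hb1, hb2, if_pos hlt]

theorem pvTake_two (cs : List Char) (k : Nat) (h : 2 * k + 1 < cs.length) :
    cs.take (2 * (k + 1)) = cs.take (2 * k) ++ [cs[2 * k], cs[2 * k + 1]] := by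
  have e1 : 2 * (k + 1) = (2 * k + 1) + 1 := by ring
  have g1 : cs[2 * k]? = some cs[2 * k] := List.getElem?_eq_getElem (by omega)
  have g2 : cs[2 * k + 1]? = some cs[2 * k + 1] := List.getElem?_eq_getElem h
  rw [e1, List.take_add_one, g2, List.take_add_one, g1]
  simp only [Option.toList_some, List.append_assoc, List.singleton_append]

-- the fused fold over evens equals (monomer fold over the prefix, dimer fold over evens)
theorem pvFold_split (cs : List Char) (k : Nat) (h : 2 * k ≤ cs.length)
    (m d : PySem.Dict String Int) :
    (pvEvens k).foldl (pvStepA cs) (m, d) =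
      ((cs.take (2 * k)).foldl pvStepMono m, (pvEvens k).foldl (pvStepDi cs) d) := by
  induction k generalizing m d with
  | zero => simp [pvEvens]
  | succ k ih =>
    have hk : 2 * k + 1 < cs.length := by omega
    rw [pvEvens_succ, List.foldl_append, List.foldl_append,
        ih (by omega), pvTake_two cs k hk, List.foldl_append]
    simp only [List.foldl_cons, List.foldl_nil]
    rw [pvStepA_split cs k hk]

-- ===== VERDICT (by name: the statement is the Claim_ definition above) =====
theorem count_dimers_nonoverlap_spec : Claim_equal_count_dimers_nonoverlap := by
  intro seq _
  simp only [Spec_count_dimers_nonoverlap, count_dimers_nonoverlap, count_dimers_nonoverlap_alt]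
  have hend : (if seq.toList.length % 2 = 0 then seq.toList.length else seq.toList.length - 1)
      = seq.toList.length - seq.toList.length % 2 := by
    by_cases hp : seq.toList.length % 2 = 0
    · rw [if_pos hp]; omega
    · rw [if_neg hp]; omega
  rw [hend]
  obtain ⟨k, hk⟩ : ∃ k, seq.toList.length - seq.toList.length % 2 = 2 * k :=
    ⟨seq.toList.length / 2, by omega⟩
  rw [hk, pvRangeEven, pvFold_split seq.toList k (by omega)]
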